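-- pv_equiv track=rewrite | github.com/mohab-mohamed/Perceptron-Neural-Network | Perceptron.py | countLeft
-- ===== SOURCE A (Python) =====
-- def countLeft(line):
--     count = 0
--     for c in line:
--         if(c == '+' or c == '#'):
--             break
--         else:
--             count += 1
--     return count
-- ===== SOURCE B (Python) =====
-- def countLeft(line):
--     a = line.find('+')
--     b = line.find('#')
--     if a == -1 and b == -1:
--         return len(line)
--     if a == -1:
--         return b
--     if b == -1:
--         return a
--     return min(a, b)
-- ===== Notes on version B (the rewrite author's own statement) =====
-- stated objective: faster
-- what changed: Replaces the char-by-char accumulator loop with two str.find sentinel lookups combined by a min/-1 case analysis.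
import Mathlib
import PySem

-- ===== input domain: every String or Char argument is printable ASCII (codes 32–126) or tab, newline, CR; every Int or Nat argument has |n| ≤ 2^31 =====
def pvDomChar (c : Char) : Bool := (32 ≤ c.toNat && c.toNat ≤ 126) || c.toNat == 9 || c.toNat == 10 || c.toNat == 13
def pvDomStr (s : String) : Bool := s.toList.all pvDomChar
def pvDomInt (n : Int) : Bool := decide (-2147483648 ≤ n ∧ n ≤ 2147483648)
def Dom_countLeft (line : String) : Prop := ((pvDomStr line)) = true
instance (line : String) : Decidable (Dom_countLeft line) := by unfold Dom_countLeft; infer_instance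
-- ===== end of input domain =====

-- B replaces A's char-by-char counting loop with two str.find lookups combined by a -1/min case analysis (faster by constant factor in a timing run; same return value).

-- ===== PORT A =====
-- the for-loop with break, as structural recursion over the same accumulator
def countLeftGo : List Char → Int → Int
  | [], count => count
  | c :: rest, count =>
    if c == '+' || c == '#' then count else countLeftGo rest (count + 1)

def countLeft (line : String) : Int := countLeftGo line.toList 0

-- ===== PORT B =====
def countLeft_alt (line : String) : Int :=
  let a := PySem.Str.find line "+"
  let b := PySem.Str.find line "#"
  if a = -1 ∧ b = -1 then PySem.Str.len line
  else if a = -1 then b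
  else if b = -1 then a
  else min a b

-- ===== PRECONDITION & SPEC =====
def Spec_countLeft (line : String) (out : Int) : Prop := out = countLeft_alt line
instance (line : String) (out : Int) : Decidable (Spec_countLeft line out) := by unfold Spec_countLeft; infer_instance

-- ===== CLAIM (what is proved, stated in full; the proofs are below) =====
def Claim_equal_countLeft : Prop := ∀ (line : String), Dom_countLeft line → Spec_countLeft line (countLeft line)

-- ===== LEMMAS AND PROOFS =====

-- B's combination of the two finds, expressed on the character list
def altVal (l : List Char) : Int :=
  let a := PySem.Chars.find l ['+']
  let b := PySem.Chars.find l ['#']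
  if a = -1 ∧ b = -1 then (l.length : Int)
  else if a = -1 then b
  else if b = -1 then a
  else min a b

lemma find_singleton_cons (x c : Char) (cs : List Char) :
    PySem.Chars.find (c::cs) [x] =
      if c = x then 0
      else if PySem.Chars.find cs [x] = -1 then -1 else 1 + PySem.Chars.find cs [x] := by
  split_ifs with h1 h2
  · have hin : ([x] : List Char) <:+: c::cs := ⟨[], cs, by simp [h1]⟩
    have h0 : 0 ≤ PySem.Chars.find (c::cs) [x] := (PySem.Chars.find_nonneg_iff _ _).2 hin
    obtain ⟨hp, hmin⟩ := PySem.Chars.find_spec h0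
    by_contra hne
    have hpos : 0 < (PySem.Chars.find (c::cs) [x]).toNat := by omega
    exact hmin 0 hpos (by simp [h1])
  · rw [PySem.Chars.find_eq_neg_one_iff] at h2 ⊢
    intro hin
    rcases (List.infix_cons_iff).1 hin with h | h
    · have : c = x := by simpa [List.cons_prefix_iff] using h
      exact h1 this
    · exact h2 h
  · have hm0 : 0 ≤ PySem.Chars.find cs [x] := by
      have := PySem.Chars.neg_one_le_find cs [x]; omega
    obtain ⟨hp, hmin⟩ := PySem.Chars.find_spec hm0
    set m := (PySem.Chars.find cs [x]).toNat with hmdef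
    have hpm1 : [x] <+: (c::cs).drop (m+1) := by simpa using hp
    have hnotbelow : ∀ i < m + 1, ¬ [x] <+: (c::cs).drop i := by
      intro i hi hpfx
      cases i with
      | zero =>
        have : c = x := by simpa [List.cons_prefix_iff] using hpfx
        exact h1 this
      | succ j => exact hmin j (by omega) (by simpa using hpfx)
    have hin : ([x] : List Char) <:+: c::cs := by
      have hex : ∃ j, [x] <+: (c::cs).drop j := ⟨m+1, hpm1⟩
      exact (PySem.Chars.isIn_iff_infix _ _).1 ((PySem.Chars.exists_prefix_drop_iff_isIn _ _).1 hex)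
    have h0 : 0 ≤ PySem.Chars.find (c::cs) [x] := (PySem.Chars.find_nonneg_iff _ _).2 hin
    obtain ⟨hp2, hmin2⟩ := PySem.Chars.find_spec h0
    set n := (PySem.Chars.find (c::cs) [x]).toNat with hndef
    have hn : n = m + 1 := by
      rcases lt_trichotomy n (m+1) with h | h | h
      · exact absurd hp2 (hnotbelow n h)
      · exact h
      · exact absurd hpm1 (hmin2 (m+1) h)
    omega

lemma altVal_nil : altVal [] = 0 := by decide

lemma altVal_cons (c : Char) (cs : List Char) :
    altVal (c::cs) = if c = '+' ∨ c = '#' then 0 else 1 + altVal cs := by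
  have hp := PySem.Chars.neg_one_le_find cs ['+']
  have hh := PySem.Chars.neg_one_le_find cs ['#']
  unfold altVal
  rw [find_singleton_cons, find_singleton_cons]
  by_cases h1 : c = '+' <;> by_cases h2 : c = '#'
  · exact absurd (h1 ▸ h2) (by decide)
  · simp only [h1, true_or, if_true, min_def]
    norm_num
    split_ifs <;> omega
  · simp only [h2, or_true, if_true, min_def]
    norm_num
    split_ifs <;> first | omega | simp_all
  · have hor : ¬ (c = '+' ∨ c = '#') := by tauto
    simp only [if_neg h1, if_neg h2, if_neg hor, List.length_cons, min_def]
    push_cast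
    split_ifs <;> omega

lemma countLeftGo_eq (l : List Char) : ∀ k : Int, countLeftGo l k = k + altVal l := by
  induction l with
  | nil => intro k; simp [countLeftGo, altVal_nil]
  | cons c cs ih =>
    intro k
    rw [altVal_cons]
    by_cases h : c = '+' ∨ c = '#'
    · have hb : (c == '+' || c == '#') = true := by
        rcases h with h | h <;> simp [h]
      simp [countLeftGo, hb, h]
    · have hb : (c == '+' || c == '#') = false := by
        rw [not_or] at h; simp [h.1, h.2]
      simp only [countLeftGo, hb, Bool.false_eq_true, if_false, ih, h]
      omega

-- ===== VERDICT (by name: the statement is the Claim_ definition above) =====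
theorem countLeft_spec : Claim_equal_countLeft := by
  intro line _
  unfold Spec_countLeft countLeft countLeft_alt
  have h : countLeftGo line.toList 0 = altVal line.toList := by
    simpa using countLeftGo_eq line.toList 0
  rw [h]
  unfold altVal
  simp [PySem.Str.find_eq, PySem.Str.len_eq]
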